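-- pv_equiv track=rewrite | github.com/ranger52065/Chatbot-Zoey | Zoey/Zoey/Zoey.py | get_last_user_messages
-- ===== SOURCE A (Python) =====
-- from typing import Optional
--
-- def get_last_user_messages(history: list) -> Optional[list]:
--     """
--     获取最后一次assistant回复后的所有用户消息
--
--     Args:
--         history: 聊天历史记录
--
--     Returns:
--         用户消息列表，如果没有则返回None
--     """
--     if not history:
--         return None
--     if history[-1]["role"] == "assistant":
--         return None
--
--     last_assistant_idx = -1
--     for i in range(len(history) - 1, -1, -1):
--         if history[i]["role"] == "assistant":
--             last_assistant_idx = i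
--             break
--
--     if last_assistant_idx == -1:
--         return history
--     return history[last_assistant_idx + 1 :]
-- ===== SOURCE B (Python) =====
-- def get_last_user_messages(history):
--     collected = []
--     for msg in reversed(history):
--         if msg["role"] == "assistant":
--             return collected[::-1] if collected else None
--         collected.append(msg)
--     return history if history else None
-- ===== Notes on version B (the rewrite author's own statement) =====
-- stated objective: simpler
-- what changed: Replaces the two explicit guards, the backward index-search loop and the slice by a single pass over reversed(history) that accumulates the answer back-to-front and returns early at the first assistant message, with no index arithmetic or slicing.
import Mathlib
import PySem

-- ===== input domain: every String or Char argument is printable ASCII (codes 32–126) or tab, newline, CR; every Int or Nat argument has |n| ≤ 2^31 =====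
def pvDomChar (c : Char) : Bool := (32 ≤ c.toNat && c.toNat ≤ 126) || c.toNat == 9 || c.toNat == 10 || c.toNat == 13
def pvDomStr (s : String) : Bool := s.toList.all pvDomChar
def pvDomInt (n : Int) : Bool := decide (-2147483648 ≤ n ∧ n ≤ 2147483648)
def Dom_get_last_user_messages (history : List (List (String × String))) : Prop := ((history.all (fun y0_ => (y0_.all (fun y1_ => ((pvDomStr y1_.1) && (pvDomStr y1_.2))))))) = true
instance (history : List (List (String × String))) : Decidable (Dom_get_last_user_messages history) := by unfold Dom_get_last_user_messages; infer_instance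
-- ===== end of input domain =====

-- B replaces A's guards + backward index search + slice by ONE reversed scan that accumulates the
-- answer back-to-front and returns early at the first assistant; same cost, different decomposition.

-- msg["role"]: first-match association lookup; Pre_ guarantees the key is present where it is read, where this is exact.
def pvRole (m : List (String × String)) : String := (m.lookup "role").getD ""

-- ===== PORT A =====
-- the backward 'for i in range(len(history)-1, -1, -1): … break' loop
def pvFindLastA (history : List (List (String × String))) : List Int → Int
  | [] => -1
  | i :: rest =>
    if pvRole (PySem.List.pyGetD history i []) = "assistant" then i
    else pvFindLastA history rest

def get_last_user_messages (history : List (List (String × String))) : Option (List (List (String × String))) :=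
  if history = [] then none
  else if pvRole (PySem.List.pyGetD history (-1) []) = "assistant" then none
  else
    let idx := pvFindLastA history (PySem.List.pyRange ((history.length : Int) - 1) (-1) (-1))
    if idx = -1 then some history
    else some (PySem.List.slice history (some (idx + 1)) none)

-- ===== PORT B =====
-- the 'for msg in reversed(history)' loop; the two early returns live in the branches
def pvGoB (history : List (List (String × String))) (collected : List (List (String × String))) :
    List (List (String × String)) → Option (List (List (String × String)))
  | [] => if history = [] then none else some history          -- 'return history if history else None'
  | m :: rest =>
    if pvRole m = "assistant" then
      if collected = [] then none                              -- 'collected[::-1] if collected else None'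
      else some ((PySem.List.slice? collected none none (-1)).getD [])
    else pvGoB history (collected ++ [m]) rest

def get_last_user_messages_alt (history : List (List (String × String))) : Option (List (List (String × String))) :=
  pvGoB history [] history.reverse

-- ===== PRECONDITION & SPEC =====
-- Pre_ excludes exactly the inputs on which BOTH Pythons raise KeyError: some message of the part
-- of history after the last assistant message — all of it if there is no assistant — lacks the
-- "role" key (both programs read exactly those messages' roles, scanning backward).
def Pre_get_last_user_messages (history : List (List (String × String))) : Prop :=
  ((history.reverse.takeWhile (fun m => !(m.lookup "role" == some "assistant"))).all
    (fun m => (m.lookup "role").isSome)) = true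
instance (history : List (List (String × String))) : Decidable (Pre_get_last_user_messages history) := by
  unfold Pre_get_last_user_messages; infer_instance

def pvWitness_get_last_user_messages : (List (List (String × String))) :=
  [[("x", "y")], [("role", "assistant")], [("role", "user")], [("role", "user")]]

def Spec_get_last_user_messages (history : List (List (String × String))) (out : Option (List (List (String × String)))) : Prop := out = get_last_user_messages_alt history
instance (history : List (List (String × String))) (out : Option (List (List (String × String)))) : Decidable (Spec_get_last_user_messages history out) := by unfold Spec_get_last_user_messages; infer_instance

-- ===== CLAIM (what is proved, stated in full; the proofs are below) =====
def Claim_equal_get_last_user_messages : Prop := ∀ (history : List (List (String × String))), Dom_get_last_user_messages history → Pre_get_last_user_messages history → Spec_get_last_user_messages history (get_last_user_messages history)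

-- ===== LEMMAS AND PROOFS =====

-- the loop of A never looks at the appended last element when every scanned index lies inside l
lemma pvFindLastA_append (l : List (List (String × String))) (m : List (String × String))
    (is : List Int) (h : ∀ i ∈ is, 0 ≤ i ∧ i < (l.length : Int)) :
    pvFindLastA (l ++ [m]) is = pvFindLastA l is := by
  induction is with
  | nil => rfl
  | cons i rest ih =>
    obtain ⟨h0, h1⟩ := h i (List.mem_cons_self ..)
    have hg : PySem.List.pyGetD (l ++ [m]) i ([] : List (String × String)) =
        PySem.List.pyGetD l i [] := by
      rw [PySem.List.pyGetD_eq_getElem _ _ h0 (by simpa using by omega),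
          PySem.List.pyGetD_eq_getElem _ _ h0 (by simpa using h1)]
      exact List.getElem_append_left _
    simp only [pvFindLastA, hg]
    split
    · rfl
    · exact ih (fun j hj => h j (List.mem_cons_of_mem _ hj))

-- A's search returns -1 or one of the scanned indices
lemma pvFindLastA_mem (h : List (List (String × String))) (is : List Int) :
    pvFindLastA h is = -1 ∨ pvFindLastA h is ∈ is := by
  induction is with
  | nil => left; rfl
  | cons i rest ih =>
    simp only [pvFindLastA]
    split
    · right; exact List.mem_cons_self ..
    · rcases ih with h1 | h1
      · left; exact h1
      · right; exact List.mem_cons_of_mem _ h1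

-- joint characterisation of A's backward index search and B's reversed scan
lemma pvKey (l : List (List (String × String))) :
    (pvFindLastA l (PySem.List.pyRange ((l.length : Int) - 1) (-1) (-1)) = -1
      ∧ ∀ (h acc : List (List (String × String))),
          pvGoB h acc l.reverse = if h = [] then none else some h)
    ∨ (0 ≤ pvFindLastA l (PySem.List.pyRange ((l.length : Int) - 1) (-1) (-1))
      ∧ pvFindLastA l (PySem.List.pyRange ((l.length : Int) - 1) (-1) (-1)) < (l.length : Int)
      ∧ ∀ (h acc : List (List (String × String))),
          pvGoB h acc l.reverse =
            (if acc ++ (l.drop (pvFindLastA l (PySem.List.pyRange ((l.length : Int) - 1) (-1) (-1)) + 1).toNat).reverse = [] then none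
             else some ((acc ++ (l.drop (pvFindLastA l (PySem.List.pyRange ((l.length : Int) - 1) (-1) (-1)) + 1).toNat).reverse).reverse))) := by
  induction l using List.reverseRecOn with
  | nil =>
    left
    refine ⟨by rw [PySem.List.pyRange_neg_one_eq_nil (by norm_num)]; rfl, ?_⟩
    intro h acc
    rfl
  | append_singleton l m ih =>
    have hlen : ((l ++ [m]).length : Int) - 1 = (l.length : Int) := by simp
    have hcons : PySem.List.pyRange ((l.length : Int)) (-1) (-1) =
        (l.length : Int) :: PySem.List.pyRange ((l.length : Int) - 1) (-1) (-1) :=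
      PySem.List.pyRange_neg_one_cons (by omega)
    have hget : PySem.List.pyGetD (l ++ [m]) ((l.length : Int)) ([] : List (String × String)) = m := by
      rw [PySem.List.pyGetD_eq_getElem _ _ (by omega) (by simp)]
      simp
    have hrev : (l ++ [m]).reverse = m :: l.reverse := by simp
    rw [hlen, hcons]
    by_cases hrm : pvRole m = "assistant"
    · right
      have hfind : pvFindLastA (l ++ [m])
          ((l.length : Int) :: PySem.List.pyRange ((l.length : Int) - 1) (-1) (-1)) = (l.length : Int) := by
        simp only [pvFindLastA, hget, if_pos hrm]
      have htn : ((l.length : Int) + 1).toNat = l.length + 1 := by omega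
      rw [hfind]
      refine ⟨by omega, by simp, ?_⟩
      intro h acc
      rw [hrev]
      simp only [pvGoB, if_pos hrm, htn]
      have hdrop : (l ++ [m]).drop (l.length + 1) = [] :=
        List.drop_eq_nil_of_le (by simp)
      rw [hdrop]
      by_cases hacc : acc = [] <;>
        simp [hacc, PySem.List.slice?_none_none_neg_one]
    · have hrest : pvFindLastA (l ++ [m])
          (PySem.List.pyRange ((l.length : Int) - 1) (-1) (-1)) =
          pvFindLastA l (PySem.List.pyRange ((l.length : Int) - 1) (-1) (-1)) := by
        apply pvFindLastA_append
        intro i hi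
        rw [PySem.List.mem_pyRange_neg_one] at hi
        omega
      have hfind : pvFindLastA (l ++ [m])
          ((l.length : Int) :: PySem.List.pyRange ((l.length : Int) - 1) (-1) (-1)) =
          pvFindLastA l (PySem.List.pyRange ((l.length : Int) - 1) (-1) (-1)) := by
        simp only [pvFindLastA, hget, if_neg hrm, hrest]
      have hstep : ∀ (h acc : List (List (String × String))),
          pvGoB h acc ((l ++ [m]).reverse) = pvGoB h (acc ++ [m]) l.reverse := by
        intro h acc
        rw [hrev]
        simp only [pvGoB, if_neg hrm]
      rw [hfind]
      rcases ih with ⟨hg, hB⟩ | ⟨hg0, hg1, hB⟩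
      · left
        refine ⟨hg, ?_⟩
        intro h acc
        rw [hstep, hB]
      · right
        refine ⟨hg0, by simp; omega, ?_⟩
        intro h acc
        rw [hstep, hB]
        have hdrop : (l ++ [m]).drop
            (pvFindLastA l (PySem.List.pyRange ((l.length : Int) - 1) (-1) (-1)) + 1).toNat =
            l.drop (pvFindLastA l (PySem.List.pyRange ((l.length : Int) - 1) (-1) (-1)) + 1).toNat ++ [m] :=
          List.drop_append_of_le_length (by omega)
      
        rw [hdrop]
        simp

-- ===== VERDICT (by name: the statement is the Claim_ definition above) =====
theorem get_last_user_messages_spec : Claim_equal_get_last_user_messages := by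
  intro history _ _
  unfold Spec_get_last_user_messages get_last_user_messages get_last_user_messages_alt
  by_cases h0 : history = []
  · subst h0; rfl
  · rw [if_neg h0]
    have hlen : 0 < history.length := List.length_pos_iff.mpr h0
    have hcons : PySem.List.pyRange ((history.length : Int) - 1) (-1) (-1) =
        ((history.length : Int) - 1) :: PySem.List.pyRange ((history.length : Int) - 1 - 1) (-1) (-1) :=
      PySem.List.pyRange_neg_one_cons (by omega)
    have hlast : PySem.List.pyGetD history ((history.length : Int) - 1) ([] : List (String × String)) =
        PySem.List.pyGetD history (-1) [] := by
      have hb : ((history.length : Int) - 1) < (history.length : Int) := by omega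
      have e1 : PySem.List.pyGetD history ((history.length : Int) - 1) ([] : List (String × String)) =
          history[((history.length : Int) - 1).toNat] :=
        PySem.List.pyGetD_eq_getElem history ([] : List (String × String)) (by omega) (by exact_mod_cast hb)
      have e2 : PySem.List.pyGetD history (-1) ([] : List (String × String)) = history.getLast h0 :=
        PySem.List.pyGetD_neg_one _ _ h0
      rw [e1, e2, List.getLast_eq_getElem]
      congr 1
      omega
    by_cases h1 : pvRole (PySem.List.pyGetD history (-1) []) = "assistant"
    · -- A returns None via its guard; B's scan meets the assistant at once with an empty buffer
      rw [if_pos h1]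
      have hfind : pvFindLastA history (PySem.List.pyRange ((history.length : Int) - 1) (-1) (-1)) =
          (history.length : Int) - 1 := by
        rw [hcons]
        simp only [pvFindLastA, hlast, if_pos h1]
      rcases pvKey history with ⟨hg, _⟩ | ⟨_, _, hB⟩
      · rw [hfind] at hg; omega
      · rw [hB history [], hfind]
        simp
    · rw [if_neg h1]
      rcases pvKey history with ⟨hg, hB⟩ | ⟨hg0, hg1, hB⟩
      · rw [if_pos hg, hB history [], if_neg h0]
      · have hne : pvFindLastA history (PySem.List.pyRange ((history.length : Int) - 1) (-1) (-1)) ≠ -1 := by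
          omega
        -- the found index is not the last one: the last message's role is not "assistant"
        have hlt : pvFindLastA history (PySem.List.pyRange ((history.length : Int) - 1) (-1) (-1)) <
            (history.length : Int) - 1 := by
          have hu : pvFindLastA history (PySem.List.pyRange ((history.length : Int) - 1) (-1) (-1)) =
              pvFindLastA history (PySem.List.pyRange ((history.length : Int) - 1 - 1) (-1) (-1)) := by
            rw [hcons]
            simp only [pvFindLastA, hlast, if_neg h1]
          rcases pvFindLastA_mem history (PySem.List.pyRange ((history.length : Int) - 1 - 1) (-1) (-1)) with hm | hm
          · rw [hu, hm]; omega
          · rw [PySem.List.mem_pyRange_neg_one] at hm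
            rw [hu]; omega
        have hdropne : history.drop
            (pvFindLastA history (PySem.List.pyRange ((history.length : Int) - 1) (-1) (-1)) + 1).toNat ≠ [] := by
          intro hnil
          rw [List.drop_eq_nil_iff] at hnil
          omega
        have hslice : PySem.List.slice history
            (some (pvFindLastA history (PySem.List.pyRange ((history.length : Int) - 1) (-1) (-1)) + 1)) none =
            history.drop (pvFindLastA history (PySem.List.pyRange ((history.length : Int) - 1) (-1) (-1)) + 1).toNat :=
          PySem.List.slice_from _ (by omega)
        rw [if_neg hne, hB history [], hslice]
        simp [hdropne]
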